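-- pv_equiv track=rewrite | github.com/T-abderrahmane/Refactoring-Swarm-Equipe-47 | src/agents/judge.py | _categorize_failures
-- ===== SOURCE A (Python) =====
-- from typing import List, Optional, Dict, Any, Tuple
--
-- def _categorize_failures(error_details: List[str]) -> Dict[str, int]:
--     """
--     Categorize test failures by type.
--
--     Args:
--         error_details: List of error messages
--
--     Returns:
--         Dictionary mapping failure types to counts
--     """
--     categories = {
--         "assertion_errors": 0,
--         "import_errors": 0,
--         "attribute_errors": 0,
--         "type_errors": 0,
--         "value_errors": 0,
--         "syntax_errors": 0,
--         "other_errors": 0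
--     }
--
--     for error in error_details:
--         error_lower = error.lower()
--
--         if "assertionerror" in error_lower or "assert" in error_lower:
--             categories["assertion_errors"] += 1
--         elif "importerror" in error_lower or "modulenotfounderror" in error_lower:
--             categories["import_errors"] += 1
--         elif "attributeerror" in error_lower:
--             categories["attribute_errors"] += 1
--         elif "typeerror" in error_lower:
--             categories["type_errors"] += 1
--         elif "valueerror" in error_lower:
--             categories["value_errors"] += 1
--         elif "syntaxerror" in error_lower or "indentationerror" in error_lower:
--             categories["syntax_errors"] += 1
--         else:
--             categories["other_errors"] += 1
--
--     return categories
-- ===== SOURCE B (Python) =====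
-- from typing import List, Dict
--
-- _RULES = [
--     ("assertion_errors", ["assertionerror", "assert"]),
--     ("import_errors", ["importerror", "modulenotfounderror"]),
--     ("attribute_errors", ["attributeerror"]),
--     ("type_errors", ["typeerror"]),
--     ("value_errors", ["valueerror"]),
--     ("syntax_errors", ["syntaxerror", "indentationerror"]),
-- ]
--
-- def _categorize_failures(error_details: List[str]) -> Dict[str, int]:
--     # Staged sieve: one pass PER CATEGORY. Each stage counts the still-unclaimed
--     # messages matching its keywords and removes them from the pool; priority
--     # order falls out of the stage order, and the leftovers are other_errors.
--     remaining = [e.lower() for e in error_details]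
--     counts: Dict[str, int] = {}
--     for cat, kws in _RULES:
--         matched = [e for e in remaining if any(k in e for k in kws)]
--         remaining = [e for e in remaining if not any(k in e for k in kws)]
--         counts[cat] = len(matched)
--     counts["other_errors"] = len(remaining)
--     return counts
-- ===== Notes on version B (the rewrite author's own statement) =====
-- stated objective: alternative
-- what changed: Replaces A's single pass with a per-error if-elif cascade and dict increments by a staged sieve: one filtering pass per category over a shrinking pool of lowercased messages, each stage counting and removing its matches, leftovers becoming other_errors.
import Mathlib
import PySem

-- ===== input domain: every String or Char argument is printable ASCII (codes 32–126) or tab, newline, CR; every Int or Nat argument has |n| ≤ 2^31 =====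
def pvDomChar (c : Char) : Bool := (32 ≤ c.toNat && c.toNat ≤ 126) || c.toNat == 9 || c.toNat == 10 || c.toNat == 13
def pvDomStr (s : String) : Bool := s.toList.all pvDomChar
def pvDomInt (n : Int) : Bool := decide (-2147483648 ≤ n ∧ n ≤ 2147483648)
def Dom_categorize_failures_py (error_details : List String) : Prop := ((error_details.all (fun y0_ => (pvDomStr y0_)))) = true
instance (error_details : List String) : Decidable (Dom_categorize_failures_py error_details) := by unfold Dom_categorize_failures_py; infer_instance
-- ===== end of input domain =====

-- B replaces A's per-error if-elif cascade with a staged sieve: one filtering pass per category over the shrinking pool (alternative decomposition; same cost).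

-- ===== PORT A =====
def pvInitCats : PySem.Dict String Int :=
  PySem.Dict.ofList [("assertion_errors", 0), ("import_errors", 0), ("attribute_errors", 0),
    ("type_errors", 0), ("value_errors", 0), ("syntax_errors", 0), ("other_errors", 0)]

def pvBump (d : PySem.Dict String Int) (k : String) : PySem.Dict String Int :=
  d.insert k (d.getD k 0 + 1)

def pvStepA (d : PySem.Dict String Int) (error : String) : PySem.Dict String Int :=
  let el := PySem.Str.lower error
  if PySem.Str.isIn "assertionerror" el || PySem.Str.isIn "assert" el then
    pvBump d "assertion_errors"
  else if PySem.Str.isIn "importerror" el || PySem.Str.isIn "modulenotfounderror" el then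
    pvBump d "import_errors"
  else if PySem.Str.isIn "attributeerror" el then
    pvBump d "attribute_errors"
  else if PySem.Str.isIn "typeerror" el then
    pvBump d "type_errors"
  else if PySem.Str.isIn "valueerror" el then
    pvBump d "value_errors"
  else if PySem.Str.isIn "syntaxerror" el || PySem.Str.isIn "indentationerror" el then
    pvBump d "syntax_errors"
  else
    pvBump d "other_errors"

def categorize_failures_py (error_details : List String) : List (String × Int) :=
  (error_details.foldl pvStepA pvInitCats).items

-- ===== PORT B =====
def pvRules : List (String × List String) :=
  [("assertion_errors", ["assertionerror", "assert"]),
   ("import_errors", ["importerror", "modulenotfounderror"]),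
   ("attribute_errors", ["attributeerror"]),
   ("type_errors", ["typeerror"]),
   ("value_errors", ["valueerror"]),
   ("syntax_errors", ["syntaxerror", "indentationerror"])]

-- staged sieve: each stage counts and removes the pool's matches for its rule; counts dict = appended pairs
def pvStage (st : List String × List (String × Int)) (r : String × List String) :
    List String × List (String × Int) :=
  let matched := st.1.filter (fun e => r.2.any (fun k => PySem.Str.isIn k e))
  let remaining := st.1.filter (fun e => !(r.2.any (fun k => PySem.Str.isIn k e)))
  (remaining, st.2 ++ [(r.1, (matched.length : Int))])

def categorize_failures_py_alt (error_details : List String) : List (String × Int) :=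
  let fin := pvRules.foldl pvStage (error_details.map PySem.Str.lower, [])
  fin.2 ++ [("other_errors", (fin.1.length : Int))]

-- ===== PRECONDITION & SPEC =====
def Spec_categorize_failures_py (error_details : List String) (out : List (String × Int)) : Prop := out = categorize_failures_py_alt error_details
instance (error_details : List String) (out : List (String × Int)) : Decidable (Spec_categorize_failures_py error_details out) := by unfold Spec_categorize_failures_py; infer_instance

-- ===== CLAIM (what is proved, stated in full; the proofs are below) =====
def Claim_equal_categorize_failures_py : Prop := ∀ (error_details : List String), Dom_categorize_failures_py error_details → Spec_categorize_failures_py error_details (categorize_failures_py error_details)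

-- ===== LEMMAS AND PROOFS =====

-- the per-category keyword tests, on an already-lowered message
def pvM1 (el : String) : Bool := PySem.Str.isIn "assertionerror" el || PySem.Str.isIn "assert" el
def pvM2 (el : String) : Bool := PySem.Str.isIn "importerror" el || PySem.Str.isIn "modulenotfounderror" el
def pvM3 (el : String) : Bool := PySem.Str.isIn "attributeerror" el
def pvM4 (el : String) : Bool := PySem.Str.isIn "typeerror" el
def pvM5 (el : String) : Bool := PySem.Str.isIn "valueerror" el
def pvM6 (el : String) : Bool := PySem.Str.isIn "syntaxerror" el || PySem.Str.isIn "indentationerror" el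

-- first-match category of a lowered message
def pvCls (el : String) : String :=
  if pvM1 el then "assertion_errors"
  else if pvM2 el then "import_errors"
  else if pvM3 el then "attribute_errors"
  else if pvM4 el then "type_errors"
  else if pvM5 el then "value_errors"
  else if pvM6 el then "syntax_errors"
  else "other_errors"

def pvCnt (k : String) (l : List String) : Int :=
  (l.countP (fun e => pvCls (PySem.Str.lower e) == k) : Int)

def pvMk (a b c d e f g : Int) : PySem.Dict String Int :=
  PySem.Dict.mk [("assertion_errors", a), ("import_errors", b), ("attribute_errors", c),
    ("type_errors", d), ("value_errors", e), ("syntax_errors", f), ("other_errors", g)]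

theorem pvStepA_cls (d : PySem.Dict String Int) (x : String) :
    pvStepA d x = pvBump d (pvCls (PySem.Str.lower x)) := by
  simp only [pvStepA, pvCls, pvM1, pvM2, pvM3, pvM4, pvM5, pvM6]
  split_ifs <;> rfl

theorem pvBump1 (a b c d e f g : Int) : pvBump (pvMk a b c d e f g) "assertion_errors" = pvMk (a+1) b c d e f g := by
  simp [pvBump, pvMk, PySem.Dict.insert, PySem.Dict.contains, PySem.Dict.getD, PySem.Dict.get?,
    List.any_cons, List.any_nil, List.find?, List.map]
theorem pvBump2 (a b c d e f g : Int) : pvBump (pvMk a b c d e f g) "import_errors" = pvMk a (b+1) c d e f g := by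
  simp [pvBump, pvMk, PySem.Dict.insert, PySem.Dict.contains, PySem.Dict.getD, PySem.Dict.get?,
    List.any_cons, List.any_nil, List.find?, List.map]
theorem pvBump3 (a b c d e f g : Int) : pvBump (pvMk a b c d e f g) "attribute_errors" = pvMk a b (c+1) d e f g := by
  simp [pvBump, pvMk, PySem.Dict.insert, PySem.Dict.contains, PySem.Dict.getD, PySem.Dict.get?,
    List.any_cons, List.any_nil, List.find?, List.map]
theorem pvBump4 (a b c d e f g : Int) : pvBump (pvMk a b c d e f g) "type_errors" = pvMk a b c (d+1) e f g := by
  simp [pvBump, pvMk, PySem.Dict.insert, PySem.Dict.contains, PySem.Dict.getD, PySem.Dict.get?,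
    List.any_cons, List.any_nil, List.find?, List.map]
theorem pvBump5 (a b c d e f g : Int) : pvBump (pvMk a b c d e f g) "value_errors" = pvMk a b c d (e+1) f g := by
  simp [pvBump, pvMk, PySem.Dict.insert, PySem.Dict.contains, PySem.Dict.getD, PySem.Dict.get?,
    List.any_cons, List.any_nil, List.find?, List.map]
theorem pvBump6 (a b c d e f g : Int) : pvBump (pvMk a b c d e f g) "syntax_errors" = pvMk a b c d e (f+1) g := by
  simp [pvBump, pvMk, PySem.Dict.insert, PySem.Dict.contains, PySem.Dict.getD, PySem.Dict.get?,
    List.any_cons, List.any_nil, List.find?, List.map]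
theorem pvBump7 (a b c d e f g : Int) : pvBump (pvMk a b c d e f g) "other_errors" = pvMk a b c d e f (g+1) := by
  simp [pvBump, pvMk, PySem.Dict.insert, PySem.Dict.contains, PySem.Dict.getD, PySem.Dict.get?,
    List.any_cons, List.any_nil, List.find?, List.map]

theorem pvCls_cases (el : String) :
    pvCls el = "assertion_errors" ∨ pvCls el = "import_errors" ∨ pvCls el = "attribute_errors" ∨
    pvCls el = "type_errors" ∨ pvCls el = "value_errors" ∨ pvCls el = "syntax_errors" ∨
    pvCls el = "other_errors" := by
  unfold pvCls; split_ifs <;> simp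

theorem pvMk_congr {a a' b b' c c' d d' e e' f f' g g' : Int}
    (h1 : a = a') (h2 : b = b') (h3 : c = c') (h4 : d = d') (h5 : e = e')
    (h6 : f = f') (h7 : g = g') : pvMk a b c d e f g = pvMk a' b' c' d' e' f' g' := by
  rw [h1, h2, h3, h4, h5, h6, h7]

theorem pvFoldA (l : List String) : ∀ (a b c d e f g : Int),
    l.foldl pvStepA (pvMk a b c d e f g) =
      pvMk (a + pvCnt "assertion_errors" l) (b + pvCnt "import_errors" l)
        (c + pvCnt "attribute_errors" l) (d + pvCnt "type_errors" l)
        (e + pvCnt "value_errors" l) (f + pvCnt "syntax_errors" l)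
        (g + pvCnt "other_errors" l) := by
  induction l with
  | nil => intro a b c d e f g; simp [pvCnt]
  | cons x l ih =>
    intro a b c d e f g
    simp only [List.foldl_cons, pvStepA_cls]
    rcases pvCls_cases (PySem.Str.lower x) with h | h | h | h | h | h | h <;>
      rw [h] <;>
      simp only [pvBump1, pvBump2, pvBump3, pvBump4, pvBump5, pvBump6, pvBump7, ih] <;>
      refine pvMk_congr ?_ ?_ ?_ ?_ ?_ ?_ ?_ <;>
      simp [pvCnt, h] <;> push_cast <;> ring

theorem pvItems_mk (a b c d e f g : Int) :
    (pvMk a b c d e f g).items =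
      [("assertion_errors", a), ("import_errors", b), ("attribute_errors", c),
       ("type_errors", d), ("value_errors", e), ("syntax_errors", f), ("other_errors", g)] := rfl

theorem pvInit_eq_mk : pvInitCats = pvMk 0 0 0 0 0 0 0 := by decide

theorem pvA_closed (l : List String) :
    categorize_failures_py l =
      [("assertion_errors", pvCnt "assertion_errors" l),
       ("import_errors", pvCnt "import_errors" l),
       ("attribute_errors", pvCnt "attribute_errors" l),
       ("type_errors", pvCnt "type_errors" l),
       ("value_errors", pvCnt "value_errors" l),
       ("syntax_errors", pvCnt "syntax_errors" l),
       ("other_errors", pvCnt "other_errors" l)] := by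
  unfold categorize_failures_py
  rw [pvInit_eq_mk, pvFoldA, pvItems_mk]
  simp

set_option maxHeartbeats 8000000 in
theorem pvB_closed (l : List String) :
    categorize_failures_py_alt l =
      [("assertion_errors", pvCnt "assertion_errors" l),
       ("import_errors", pvCnt "import_errors" l),
       ("attribute_errors", pvCnt "attribute_errors" l),
       ("type_errors", pvCnt "type_errors" l),
       ("value_errors", pvCnt "value_errors" l),
       ("syntax_errors", pvCnt "syntax_errors" l),
       ("other_errors", pvCnt "other_errors" l)] := by
  unfold categorize_failures_py_alt pvRules pvStage pvCnt
  simp only [List.foldl_cons, List.foldl_nil, List.any_cons, List.any_nil, Bool.or_false,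
    List.nil_append, List.cons_append, ← List.countP_eq_length_filter, List.countP_filter,
    List.countP_map, List.cons.injEq, Prod.mk.injEq, and_true, true_and]
  refine ⟨?_, ?_, ?_, ?_, ?_, ?_, ?_⟩ <;>
    (norm_cast
     apply List.countP_congr
     intro a _
     simp only [Function.comp_apply]
     generalize PySem.Str.lower a = e
     unfold pvCls pvM1 pvM2 pvM3 pvM4 pvM5 pvM6
     split_ifs <;> (try simp_all) <;> (intros; simp_all))

-- ===== VERDICT (by name: the statement is the Claim_ definition above) =====
theorem categorize_failures_py_spec : Claim_equal_categorize_failures_py := by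
  intro l _
  unfold Spec_categorize_failures_py
  rw [pvA_closed, pvB_closed]
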